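-- pv_equiv track=rewrite | github.com/Melisius/Cursed_Individual | bot.py | message_is
-- ===== SOURCE A (Python) =====
-- def message_is(word, msg):
--     if word == msg:
--         return True
--     else:
--         endlist = [".","?","!"]
--         for item in endlist:
--             if word == msg+item:
--                 return True
--     return False
-- ===== SOURCE B (Python) =====
-- def message_is(word, msg):
--     # Simultaneous character walk: advance one index over both strings while
--     # msg lasts; afterwards the leftover of word must be empty or one closing
--     # punctuation mark.
--     i = 0
--     n = len(msg)
--     while i < n:
--         if i >= len(word) or word[i] != msg[i]:
--             return False
--         i += 1
--     return word[i:] in ("", ".", "?", "!")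
-- ===== Notes on version B (the rewrite author's own statement) =====
-- stated objective: alternative
-- what changed: Replaces A's loop that builds each candidate string msg+punct and compares whole strings with a single simultaneous character-by-character walk over word and msg whose final step tests the leftover of word against ('', '.', '?', '!').
import Mathlib
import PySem

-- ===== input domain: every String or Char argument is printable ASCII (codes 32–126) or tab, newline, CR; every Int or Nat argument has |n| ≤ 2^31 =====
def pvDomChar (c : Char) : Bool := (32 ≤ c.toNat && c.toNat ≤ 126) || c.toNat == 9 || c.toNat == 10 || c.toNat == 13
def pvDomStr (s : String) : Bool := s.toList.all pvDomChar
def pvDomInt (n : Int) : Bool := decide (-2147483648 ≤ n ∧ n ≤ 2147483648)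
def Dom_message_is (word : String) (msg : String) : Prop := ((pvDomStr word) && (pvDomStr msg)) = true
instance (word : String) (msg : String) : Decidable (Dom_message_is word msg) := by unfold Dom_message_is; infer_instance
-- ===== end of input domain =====

-- B replaces A's loop over candidate strings msg+punct with a single simultaneous
-- character walk of word and msg (objective: alternative decomposition).

-- ===== PORT A =====
-- for-loop with early `return True` over endlist = List.any over the same list, same order
def message_is (word : String) (msg : String) : Bool :=
  if word == msg then true
  else
    let endlist : List String := [".", "?", "!"]
    endlist.any (fun item => word == msg ++ item)

-- ===== PORT B =====
-- Source B's index walk as structural recursion over the character lists, same state: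
-- msg exhausted -> leftover of word in ("", ".", "?", "!");
-- word exhausted or head mismatch -> False; else step both.
def msgWalk : List Char → List Char → Bool
  | w, [] => ([[], ['.'], ['?'], ['!']] : List (List Char)).contains w
  | [], _ :: _ => false
  | c :: w, d :: m => if c ≠ d then false else msgWalk w m

def message_is_alt (word : String) (msg : String) : Bool :=
  msgWalk word.toList msg.toList

-- ===== PRECONDITION & SPEC =====
def Spec_message_is (word : String) (msg : String) (out : Bool) : Prop := out = message_is_alt word msg
instance (word : String) (msg : String) (out : Bool) : Decidable (Spec_message_is word msg out) := by unfold Spec_message_is; infer_instance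

-- ===== CLAIM (what is proved, stated in full; the proofs are below) =====
def Claim_equal_message_is : Prop := ∀ (word : String) (msg : String), Dom_message_is word msg → Spec_message_is word msg (message_is word msg)

-- ===== LEMMAS AND PROOFS =====

-- the walk recognises exactly: word = msg, or msg followed by one closing mark
theorem msgWalk_eq (m w : List Char) :
    msgWalk w m = (decide (w = m) || decide (w = m ++ ['.']) ||
      decide (w = m ++ ['?']) || decide (w = m ++ ['!'])) := by
  induction m generalizing w with
  | nil =>
    cases w with
    | nil => rfl
    | cons c w =>
      simp only [msgWalk, List.contains_eq_mem]
      simp [Bool.or_assoc]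
  | cons d m ih =>
    cases w with
    | nil => simp [msgWalk]
    | cons c w =>
      by_cases h : c = d
      · subst h
        simp [msgWalk, ih]
      · simp [msgWalk, h]

-- ===== VERDICT (by name: the statement is the Claim_ definition above) =====
theorem message_is_spec : Claim_equal_message_is := by
  intro word msg _
  unfold Spec_message_is message_is message_is_alt
  rw [msgWalk_eq]
  by_cases h : word = msg
  · simp [h]
  · have hbeq : (word == msg) = false := by simp [h]
    have hL : word.toList ≠ msg.toList := fun hc => h (String.toList_inj.mp hc)
    simp only [hbeq, Bool.false_eq_true, if_false, List.any_cons, List.any_nil,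
      Bool.or_false, hL]
    rw [Bool.eq_iff_iff]
    simp only [Bool.or_eq_true, beq_iff_eq, decide_eq_true_eq,
      ← @String.toList_inj word (msg ++ "."), ← @String.toList_inj word (msg ++ "?"),
      ← @String.toList_inj word (msg ++ "!"), String.toList_append]
    norm_num
    tauto
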